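-- pv_equiv track=rewrite | github.com/adobe/libLOL | scripts/prepare_data.py | _auto_split
-- ===== SOURCE A (Python) =====
-- def _auto_split(x_d, y_d, commands):
--     x0 = []
--     x1 = []
--     command0 = []
--     command1 = []
--     for x, y, c in zip(x_d, y_d, commands):
--         if y == 1:
--             x1.append(x)
--             command1.append(c)
--         else:
--             x0.append(x)
--             command0.append(c)
--
--     x_train = []
--     y_train = []
--     x_dev = []
--     y_dev = []
--     command_dev = []
--     cnt = 0
--     for x, command in zip(x0, command0):
--         cnt += 1
--         if cnt % 10 == 0:
--             x_dev.append(x)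
--             y_dev.append(0)
--             command_dev.append(command)
--         else:
--             x_train.append(x)
--             y_train.append(0)
--
--     for x, command in zip(x1, command1):
--         cnt += 1
--         if cnt % 10 == 0:
--             x_dev.append(x)
--             y_dev.append(1)
--             command_dev.append(command)
--         else:
--             x_train.append(x)
--             y_train.append(1)
--
--     return x_train, y_train, x_dev, y_dev, command_dev
-- ===== SOURCE B (Python) =====
-- def _auto_split(x_d, y_d, commands):
--     rows = list(zip(x_d, y_d, commands))
--     # dev membership is decided by closed-form rank arithmetic: a label-0 row is
--     # held out iff its rank r0 among label-0 rows has r0 % 10 == 0; a label-1 row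
--     # iff (n0 + r1) % 10 == 0, where n0 = total number of label-0 rows.
--     n0 = sum(1 for _, y, _ in rows if y != 1)
--     t0, t1, d0, d1, c0, c1 = [], [], [], [], [], []
--     r0 = 0
--     r1 = 0
--     for x, y, c in rows:
--         if y == 1:
--             r1 += 1
--             if (n0 + r1) % 10 == 0:
--                 d1.append(x)
--                 c1.append(c)
--             else:
--                 t1.append(x)
--         else:
--             r0 += 1
--             if r0 % 10 == 0:
--                 d0.append(x)
--                 c0.append(c)
--             else:
--                 t0.append(x)
--     return (t0 + t1,
--             [0] * len(t0) + [1] * len(t1),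
--             d0 + d1,
--             [0] * len(d0) + [1] * len(d1),
--             c0 + c1)
-- ===== Notes on version B (the rewrite author's own statement) =====
-- stated objective: alternative
-- what changed: Instead of A's grouping pass followed by two sequential counter loops, B makes a single interleaved pass over the original rows, deciding dev membership per row by closed-form rank arithmetic (r0 % 10, (n0 + r1) % 10 with n0 precomputed) and producing the y-lists by length replication instead of per-item appends.
import Mathlib
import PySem

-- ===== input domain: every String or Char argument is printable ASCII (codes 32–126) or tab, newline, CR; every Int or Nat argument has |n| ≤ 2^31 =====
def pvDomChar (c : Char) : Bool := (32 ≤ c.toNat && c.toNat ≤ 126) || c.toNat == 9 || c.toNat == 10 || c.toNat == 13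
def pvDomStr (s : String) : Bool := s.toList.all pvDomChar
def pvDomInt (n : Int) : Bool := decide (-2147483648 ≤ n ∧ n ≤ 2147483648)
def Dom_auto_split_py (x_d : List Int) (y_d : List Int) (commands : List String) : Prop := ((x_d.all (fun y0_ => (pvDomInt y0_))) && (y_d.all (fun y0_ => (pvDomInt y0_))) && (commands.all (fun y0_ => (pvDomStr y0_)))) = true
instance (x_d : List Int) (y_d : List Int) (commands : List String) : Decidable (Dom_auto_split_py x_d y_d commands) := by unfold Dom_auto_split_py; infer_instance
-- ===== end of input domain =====

-- B replaces A's grouping pass + two sequential counter loops by a single interleaved pass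
-- deciding dev membership per row from rank arithmetic with a precomputed label-0 count
-- (objective: alternative).


-- ===== PORT A =====
-- A-side helper: body of each of the two counter loops (label 0 resp. 1)
def pvStepA (lab : Int)
    (s : List Int × List Int × List Int × List Int × List String × Int)
    (p : Int × String) :
    List Int × List Int × List Int × List Int × List String × Int :=
  let cnt := s.2.2.2.2.2 + 1
  if cnt % 10 == 0 then
    (s.1, s.2.1, s.2.2.1 ++ [p.1], s.2.2.2.1 ++ [lab], s.2.2.2.2.1 ++ [p.2], cnt)
  else
    (s.1 ++ [p.1], s.2.1 ++ [lab], s.2.2.1, s.2.2.2.1, s.2.2.2.2.1, cnt)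

def auto_split_py (x_d : List Int) (y_d : List Int) (commands : List String) :
    List Int × List Int × List Int × List Int × List String :=
  -- first loop: dispatch by label into x0/x1/command0/command1
  let s1 := (x_d.zip (y_d.zip commands)).foldl
    (fun (s : List Int × List Int × List String × List String) p =>
      if p.2.1 == 1 then (s.1, s.2.1 ++ [p.1], s.2.2.1, s.2.2.2 ++ [p.2.2])
      else (s.1 ++ [p.1], s.2.1, s.2.2.1 ++ [p.2.2], s.2.2.2))
    ([], [], [], [])
  let x0 := s1.1; let x1 := s1.2.1; let c0 := s1.2.2.1; let c1 := s1.2.2.2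
  -- second loop over zip x0 command0, third over zip x1 command1, counter carried across
  let s2 := (x0.zip c0).foldl (pvStepA 0) ([], [], [], [], [], 0)
  let s3 := (x1.zip c1).foldl (pvStepA 1) s2
  (s3.1, s3.2.1, s3.2.2.1, s3.2.2.2.1, s3.2.2.2.2.1)

-- ===== PORT B =====
-- B-side helper: body of B's single loop; state = (t0, t1, d0, d1, c0, c1, r0, r1)
def pvStepB (n0 : Int)
    (s : List Int × List Int × List Int × List Int × List String × List String × Int × Int)
    (p : Int × Int × String) :
    List Int × List Int × List Int × List Int × List String × List String × Int × Int :=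
  if p.2.1 == 1 then
    let r1 := s.2.2.2.2.2.2.2 + 1
    if (n0 + r1) % 10 == 0 then
      (s.1, s.2.1, s.2.2.1, s.2.2.2.1 ++ [p.1], s.2.2.2.2.1, s.2.2.2.2.2.1 ++ [p.2.2],
        s.2.2.2.2.2.2.1, r1)
    else
      (s.1, s.2.1 ++ [p.1], s.2.2.1, s.2.2.2.1, s.2.2.2.2.1, s.2.2.2.2.2.1,
        s.2.2.2.2.2.2.1, r1)
  else
    let r0 := s.2.2.2.2.2.2.1 + 1
    if r0 % 10 == 0 then
      (s.1, s.2.1, s.2.2.1 ++ [p.1], s.2.2.2.1, s.2.2.2.2.1 ++ [p.2.2], s.2.2.2.2.2.1,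
        r0, s.2.2.2.2.2.2.2)
    else
      (s.1 ++ [p.1], s.2.1, s.2.2.1, s.2.2.2.1, s.2.2.2.2.1, s.2.2.2.2.2.1,
        r0, s.2.2.2.2.2.2.2)

def auto_split_py_alt (x_d : List Int) (y_d : List Int) (commands : List String) :
    List Int × List Int × List Int × List Int × List String :=
  let rows := x_d.zip (y_d.zip commands)
  -- n0 = sum(1 for _, y, _ in rows if y != 1)
  let n0 : Int := rows.foldl (fun a p => if p.2.1 != 1 then a + 1 else a) 0
  let s := rows.foldl (pvStepB n0) ([], [], [], [], [], [], 0, 0)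
  (s.1 ++ s.2.1,
   List.replicate s.1.length (0 : Int) ++ List.replicate s.2.1.length (1 : Int),
   s.2.2.1 ++ s.2.2.2.1,
   List.replicate s.2.2.1.length (0 : Int) ++ List.replicate s.2.2.2.1.length (1 : Int),
   s.2.2.2.2.1 ++ s.2.2.2.2.2.1)

-- ===== PRECONDITION & SPEC =====
def Spec_auto_split_py (x_d : List Int) (y_d : List Int) (commands : List String) (out : List Int × List Int × List Int × List Int × List String) : Prop := out = auto_split_py_alt x_d y_d commands
instance (x_d : List Int) (y_d : List Int) (commands : List String) (out : List Int × List Int × List Int × List Int × List String) : Decidable (Spec_auto_split_py x_d y_d commands out) := by unfold Spec_auto_split_py; infer_instance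

-- ===== CLAIM (what is proved, stated in full; the proofs are below) =====
def Claim_equal_auto_split_py : Prop := ∀ (x_d : List Int) (y_d : List Int) (commands : List String), Dom_auto_split_py x_d y_d commands → Spec_auto_split_py x_d y_d commands (auto_split_py x_d y_d commands)

-- ===== LEMMAS AND PROOFS =====
-- proof-only helpers: positions whose 1-indexed count is / is not a multiple of 10
def pvDev {α : Type} (l : List α) (c : Int) : List (Int × α) :=
  (PySem.List.enumerate l c).filter (fun p => (p.1 + 1) % 10 == 0)

def pvTrain {α : Type} (l : List α) (c : Int) : List (Int × α) :=
  (PySem.List.enumerate l c).filter (fun p => (p.1 + 1) % 10 != 0)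

theorem pvEnumerate_map {α β : Type} (g : α → β) (l : List α) (c : Int) :
    PySem.List.enumerate (l.map g) c = (PySem.List.enumerate l c).map (fun p => (p.1, g p.2)) := by
  induction l generalizing c with
  | nil => simp [PySem.List.enumerate_nil]
  | cons a t ih => simp [PySem.List.enumerate_cons, ih]

theorem pvDev_map {α β : Type} (g : α → β) (l : List α) (c : Int) :
    pvDev (l.map g) c = (pvDev l c).map (fun p => (p.1, g p.2)) := by
  simp [pvDev, pvEnumerate_map, List.filter_map, Function.comp_def]

theorem pvTrain_map {α β : Type} (g : α → β) (l : List α) (c : Int) :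
    pvTrain (l.map g) c = (pvTrain l c).map (fun p => (p.1, g p.2)) := by
  simp [pvTrain, pvEnumerate_map, List.filter_map, Function.comp_def]

-- A's first loop produces the two stable label groups
theorem pvFoldSplit (L : List (Int × Int × String)) (a0 a1 : List Int) (b0 b1 : List String) :
    L.foldl
      (fun (s : List Int × List Int × List String × List String) p =>
        if p.2.1 == 1 then (s.1, s.2.1 ++ [p.1], s.2.2.1, s.2.2.2 ++ [p.2.2])
        else (s.1 ++ [p.1], s.2.1, s.2.2.1 ++ [p.2.2], s.2.2.2))
      (a0, a1, b0, b1)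
    = (a0 ++ (L.filter (fun p => !(p.2.1 == 1))).map (·.1),
       a1 ++ (L.filter (fun p => p.2.1 == 1)).map (·.1),
       b0 ++ (L.filter (fun p => !(p.2.1 == 1))).map (·.2.2),
       b1 ++ (L.filter (fun p => p.2.1 == 1)).map (·.2.2)) := by
  induction L generalizing a0 a1 b0 b1 with
  | nil => simp
  | cons p t ih =>
    simp only [List.foldl_cons]
    by_cases h : (p.2.1 == 1) = true
    · rw [if_pos h, ih]; simp [h]
    · rw [if_neg h, ih]
      have h' : (p.2.1 == 1) = false := by revert h; cases (p.2.1 == 1) <;> simp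
      simp [h']

-- A's counter loop, characterised by index arithmetic
theorem pvFoldA (lab : Int) (ps : List (Int × String))
    (xt yt xd yd : List Int) (cd : List String) (c : Int) :
    ps.foldl (pvStepA lab) (xt, yt, xd, yd, cd, c)
    = (xt ++ (pvTrain ps c).map (·.2.1),
       yt ++ (pvTrain ps c).map (fun _ => lab),
       xd ++ (pvDev ps c).map (·.2.1),
       yd ++ (pvDev ps c).map (fun _ => lab),
       cd ++ (pvDev ps c).map (·.2.2),
       c + ps.length) := by
  induction ps generalizing xt yt xd yd cd c with
  | nil => simp [pvTrain, pvDev, PySem.List.enumerate_nil]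
  | cons p t ih =>
    by_cases h : (c + 1) % 10 = 0 <;>
      simp [List.foldl_cons, pvStepA, h, ih, pvTrain, pvDev,
        PySem.List.enumerate_cons] <;>
      omega

-- B's single loop, factorised by label into the same index arithmetic
theorem pvFoldB (n0 : Int) (L : List (Int × Int × String))
    (t0 t1 d0 d1 : List Int) (c0 c1 : List String) (r0 r1 : Int) :
    L.foldl (pvStepB n0) (t0, t1, d0, d1, c0, c1, r0, r1)
    = (t0 ++ (pvTrain (L.filter (fun p => !(p.2.1 == 1))) r0).map (·.2.1),
       t1 ++ (pvTrain (L.filter (fun p => p.2.1 == 1)) (n0 + r1)).map (·.2.1),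
       d0 ++ (pvDev (L.filter (fun p => !(p.2.1 == 1))) r0).map (·.2.1),
       d1 ++ (pvDev (L.filter (fun p => p.2.1 == 1)) (n0 + r1)).map (·.2.1),
       c0 ++ (pvDev (L.filter (fun p => !(p.2.1 == 1))) r0).map (·.2.2.2),
       c1 ++ (pvDev (L.filter (fun p => p.2.1 == 1)) (n0 + r1)).map (·.2.2.2),
       r0 + (L.filter (fun p => !(p.2.1 == 1))).length,
       r1 + (L.filter (fun p => p.2.1 == 1)).length) := by
  induction L generalizing t0 t1 d0 d1 c0 c1 r0 r1 with
  | nil => simp [pvTrain, pvDev, PySem.List.enumerate_nil]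
  | cons p t ih =>
    simp only [List.foldl_cons]
    by_cases h : (p.2.1 == 1) = true
    · have e : n0 + (r1 + 1) = n0 + r1 + 1 := by ring
      by_cases h2 : (n0 + r1 + 1) % 10 = 0 <;>
        simp [pvStepB, h, e, h2, ih, pvTrain, pvDev, PySem.List.enumerate_cons] <;>
        omega
    · have h' : (p.2.1 == 1) = false := by revert h; cases (p.2.1 == 1) <;> simp
      by_cases h2 : (r0 + 1) % 10 = 0 <;>
        simp [pvStepB, h', h2, ih, pvTrain, pvDev, PySem.List.enumerate_cons] <;>
        omega

-- B's counting fold = length of the filtered list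
theorem pvFoldCount (L : List (Int × Int × String)) (a : Int) :
    L.foldl (fun a p => if p.2.1 != 1 then a + 1 else a) a
    = a + ((L.filter (fun p => !(p.2.1 == 1))).length : Int) := by
  induction L generalizing a with
  | nil => simp
  | cons p t ih =>
    by_cases h : (p.2.1 != 1) = true
    · rw [List.foldl_cons, if_pos h, ih, List.filter_cons]
      have h' : (!(p.2.1 == 1)) = true := by simpa using h
      simp [h']; omega
    · rw [List.foldl_cons, if_neg h, ih, List.filter_cons]
      have h' : (!(p.2.1 == 1)) = false := by simpa using h
      simp [h']

-- common normal form of both ports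
def pvNF (L : List (Int × Int × String)) :
    List Int × List Int × List Int × List Int × List String :=
  let l0 := L.filter (fun p => !(p.2.1 == 1))
  let l1 := L.filter (fun p => p.2.1 == 1)
  ((pvTrain l0 0).map (·.2.1) ++ (pvTrain l1 (l0.length : Int)).map (·.2.1),
   (pvTrain l0 0).map (fun _ => (0 : Int)) ++ (pvTrain l1 (l0.length : Int)).map (fun _ => (1 : Int)),
   (pvDev l0 0).map (·.2.1) ++ (pvDev l1 (l0.length : Int)).map (·.2.1),
   (pvDev l0 0).map (fun _ => (0 : Int)) ++ (pvDev l1 (l0.length : Int)).map (fun _ => (1 : Int)),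
   (pvDev l0 0).map (·.2.2.2) ++ (pvDev l1 (l0.length : Int)).map (·.2.2.2))

theorem pvA_NF (x_d : List Int) (y_d : List Int) (commands : List String) :
    auto_split_py x_d y_d commands = pvNF (x_d.zip (y_d.zip commands)) := by
  simp only [auto_split_py]
  rw [pvFoldSplit]
  simp only [List.nil_append, List.zip_map']
  rw [pvFoldA, pvFoldA]
  simp only [List.nil_append, pvTrain_map, pvDev_map, List.map_map, Function.comp_def,
    List.length_map, Int.zero_add, List.map_const']
  simp [pvNF, List.map_const']

theorem pvB_NF (x_d : List Int) (y_d : List Int) (commands : List String) :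
    auto_split_py_alt x_d y_d commands = pvNF (x_d.zip (y_d.zip commands)) := by
  simp only [auto_split_py_alt]
  rw [pvFoldCount, pvFoldB]
  simp only [List.nil_append, Int.zero_add, Int.add_zero, pvNF, List.length_map,
    List.map_const']

-- ===== VERDICT (by name: the statement is the Claim_ definition above) =====
theorem auto_split_py_spec : Claim_equal_auto_split_py := by
  intro x_d y_d commands _
  show auto_split_py x_d y_d commands = auto_split_py_alt x_d y_d commands
  rw [pvA_NF, pvB_NF]
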